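-- pv_equiv track=rewrite | github.com/DragonMinded/dragoncurses | dragoncurses/context.py | __split_formatted_string
-- ===== SOURCE A (Python) =====
-- from typing import Any, Dict, Generator, Optional, List
--
-- def __split_formatted_string(string: str) -> List[str]:
--     accumulator: List[str] = []
--     parts: List[str] = []
--
--     for ch in string:
--         if ch == "<":
--             if accumulator:
--                 parts.append("".join(accumulator))
--                 accumulator = []
--             accumulator.append(ch)
--         elif ch == ">":
--             accumulator.append(ch)
--             if accumulator[0] == "<":
--                 parts.append("".join(accumulator))
--                 accumulator = []
--         else:
--             accumulator.append(ch)
--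
--     if accumulator:
--         parts.append("".join(accumulator))
--     return parts
-- ===== SOURCE B (Python) =====
-- from typing import List
--
-- def __split_formatted_string(string: str) -> List[str]:
--     # Index-based segment scanner: jump over whole segments instead of
--     # accumulating character by character.
--     parts: List[str] = []
--     i = 0
--     n = len(string)
--     while i < n:
--         if string[i] == "<":
--             j = i + 1
--             while j < n and string[j] != "<" and string[j] != ">":
--                 j += 1
--             if j < n and string[j] == ">":
--                 parts.append(string[i:j + 1])
--                 i = j + 1
--             else:
--                 parts.append(string[i:j])
--                 i = j
--         else:
--             j = i
--             while j < n and string[j] != "<":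
--                 j += 1
--             parts.append(string[i:j])
--             i = j
--     return parts
-- ===== Notes on version B (the rewrite author's own statement) =====
-- stated objective: alternative
-- what changed: Replaced the char-by-char accumulator/flush state machine with an index-based tokenizer that jumps over whole segments (closed tag, unterminated '<...' run, or plain-text run) using slicing.
import Mathlib
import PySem

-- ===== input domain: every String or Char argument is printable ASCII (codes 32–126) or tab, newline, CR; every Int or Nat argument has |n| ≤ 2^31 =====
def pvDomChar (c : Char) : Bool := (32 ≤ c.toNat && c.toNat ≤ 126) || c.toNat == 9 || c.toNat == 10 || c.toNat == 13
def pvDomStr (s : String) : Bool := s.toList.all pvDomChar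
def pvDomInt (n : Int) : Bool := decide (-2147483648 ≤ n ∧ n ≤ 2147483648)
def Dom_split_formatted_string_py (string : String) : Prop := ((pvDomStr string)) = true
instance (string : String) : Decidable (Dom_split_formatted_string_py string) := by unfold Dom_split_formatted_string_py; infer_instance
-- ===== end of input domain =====

-- B replaces A's char-by-char accumulator state machine with a segment-jumping
-- tokenizer (objective: alternative; same O(n) cost).

-- ===== PORT A =====
-- the for-loop of A: state = (accumulator, parts); returns the final state
def pvALoop : List Char → List Char → List String → List Char × List String
  | [], acc, parts => (acc, parts)
  | ch :: rest, acc, parts =>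
    if ch = '<' then
      let parts' := if acc ≠ [] then parts ++ [String.ofList acc] else parts
      pvALoop rest ([] ++ [ch]) parts'
    else if ch = '>' then
      let acc' := acc ++ [ch]
      if acc'.head? = some '<' then pvALoop rest [] (parts ++ [String.ofList acc'])
      else pvALoop rest acc' parts
    else pvALoop rest (acc ++ [ch]) parts

def split_formatted_string_py (string : String) : List String :=
  let st := pvALoop string.toList [] []
  if st.1 ≠ [] then st.2 ++ [String.ofList st.1] else st.2

-- ===== PORT B =====
-- B's outer while-loop: each iteration emits one whole segment and jumps past it.
-- The inner index scans `while j < n and ...` are the takeWhile/dropWhile pair.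
def pvBGo : List Char → List String
  | [] => []
  | c :: rest =>
    if c = '<' then
      let tk := rest.takeWhile (fun x => x != '<' && x != '>')
      let dr := rest.dropWhile (fun x => x != '<' && x != '>')
      if dr.head? = some '>' then
        String.ofList ('<' :: tk ++ ['>']) :: pvBGo dr.tail
      else
        String.ofList ('<' :: tk) :: pvBGo dr
    else
      String.ofList (c :: rest.takeWhile (fun x => x != '<')) ::
        pvBGo (rest.dropWhile (fun x => x != '<'))
termination_by l => l.length
decreasing_by
  · have h1 : (rest.dropWhile (fun x => x != '<' && x != '>')).tail.length =
        (rest.dropWhile (fun x => x != '<' && x != '>')).length - 1 := List.length_tail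
    have h2 := List.length_dropWhile_le (fun x => x != '<' && x != '>') rest
    simp only [List.length_cons]; omega
  · have h2 := List.length_dropWhile_le (fun x => x != '<' && x != '>') rest
    simp only [List.length_cons]; omega
  · have h2 := List.length_dropWhile_le (fun x => x != '<') rest
    simp only [List.length_cons]; omega

def split_formatted_string_py_alt (string : String) : List String := pvBGo string.toList

-- ===== PRECONDITION & SPEC =====
def Spec_split_formatted_string_py (string : String) (out : List String) : Prop := out = split_formatted_string_py_alt string
instance (string : String) (out : List String) : Decidable (Spec_split_formatted_string_py string out) := by unfold Spec_split_formatted_string_py; infer_instance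

-- ===== CLAIM (what is proved, stated in full; the proofs are below) =====
def Claim_equal_split_formatted_string_py : Prop := ∀ (string : String), Dom_split_formatted_string_py string → Spec_split_formatted_string_py string (split_formatted_string_py string)

-- ===== LEMMAS AND PROOFS =====

-- final flush of A (the code after the for-loop)
def pvFin (st : List Char × List String) : List String :=
  if st.1 ≠ [] then st.2 ++ [String.ofList st.1] else st.2

-- what B produces from a tag accumulator '<' :: t followed by input l
def pvTagCont (t l : List Char) : List String :=
  let tk := l.takeWhile (fun x => x != '<' && x != '>')
  let dr := l.dropWhile (fun x => x != '<' && x != '>')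
  if dr.head? = some '>' then String.ofList ('<' :: (t ++ tk) ++ ['>']) :: pvBGo dr.tail
  else String.ofList ('<' :: (t ++ tk)) :: pvBGo dr

theorem pvBGo_nil : pvBGo [] = [] := by rw [pvBGo]

theorem pvBGo_cons (c : Char) (rest : List Char) :
    pvBGo (c :: rest) =
      if c = '<' then pvTagCont [] rest
      else String.ofList (c :: rest.takeWhile (fun x => x != '<')) ::
        pvBGo (rest.dropWhile (fun x => x != '<')) := by
  rw [pvBGo, pvTagCont]
  simp

theorem pvKey : ∀ (l : List Char) (parts : List String),
    (pvFin (pvALoop l [] parts) = parts ++ pvBGo l)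
    ∧ (∀ acc, acc ≠ [] → '<' ∉ acc →
        pvFin (pvALoop l acc parts) =
          parts ++ String.ofList (acc ++ l.takeWhile (fun x => x != '<')) ::
            pvBGo (l.dropWhile (fun x => x != '<')))
    ∧ (∀ t, '<' ∉ t → '>' ∉ t →
        pvFin (pvALoop l ('<' :: t) parts) = parts ++ pvTagCont t l) := by
  intro l
  induction l with
  | nil =>
    intro parts
    refine ⟨by simp [pvALoop, pvFin, pvBGo_nil], ?_, ?_⟩
    · intro acc h1 _
      simp [pvALoop, pvFin, h1, pvBGo_nil]
    · intro t _ _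
      simp [pvALoop, pvFin, pvTagCont, pvBGo_nil]
  | cons ch rest ih =>
    intro parts
    refine ⟨?_, ?_, ?_⟩
    · -- acc = []
      by_cases h1 : ch = '<'
      · subst h1
        have step : pvALoop ('<' :: rest) [] parts = pvALoop rest ['<'] parts := by
          simp [pvALoop]
        rw [step, (ih parts).2.2 [] (by simp) (by simp), pvBGo_cons]
        simp
      · by_cases h2 : ch = '>'
        · subst h2
          have step : pvALoop ('>' :: rest) [] parts = pvALoop rest ['>'] parts := by
            simp [pvALoop]
          rw [step, (ih parts).2.1 ['>'] (by simp) (by simp), pvBGo_cons]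
          simp
        · have step : pvALoop (ch :: rest) [] parts = pvALoop rest [ch] parts := by
            simp [pvALoop, h1, h2]
          rw [step, (ih parts).2.1 [ch] (by simp) (by simp [eq_comm, h1]), pvBGo_cons]
          simp [h1]
    · -- acc nonempty, no '<'
      intro acc hne hnolt
      by_cases h1 : ch = '<'
      · subst h1
        have step : pvALoop ('<' :: rest) acc parts =
            pvALoop rest ['<'] (parts ++ [String.ofList acc]) := by
          simp [pvALoop, hne]
        rw [step, (ih (parts ++ [String.ofList acc])).2.2 [] (by simp) (by simp)]
        have hhd : (fun x => x != '<') '<' = false := by decide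
        simp [pvBGo_cons]
      · by_cases h2 : ch = '>'
        · subst h2
          have step : pvALoop ('>' :: rest) acc parts = pvALoop rest (acc ++ ['>']) parts := by
            cases acc with
            | nil => exact absurd rfl hne
            | cons a as =>
              have ha : ¬ a = '<' := fun h => hnolt (h ▸ List.mem_cons_self)
              simp [pvALoop, ha]
          rw [step, (ih parts).2.1 (acc ++ ['>']) (by simp) (by
            intro hmem
            rcases List.mem_append.mp hmem with h | h
            · exact hnolt h
            · simp at h)]
          simp
        · have step : pvALoop (ch :: rest) acc parts = pvALoop rest (acc ++ [ch]) parts := by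
            simp [pvALoop, h1, h2]
          rw [step, (ih parts).2.1 (acc ++ [ch]) (by simp) (by
            intro hmem
            rcases List.mem_append.mp hmem with h | h
            · exact hnolt h
            · simp at h; exact h1 h.symm)]
          simp [h1]
    · -- acc = '<' :: t
      intro t hlt hgt
      by_cases h1 : ch = '<'
      · subst h1
        have step : pvALoop ('<' :: rest) ('<' :: t) parts =
            pvALoop rest ['<'] (parts ++ [String.ofList ('<' :: t)]) := by
          simp [pvALoop]
        rw [step, (ih (parts ++ [String.ofList ('<' :: t)])).2.2 [] (by simp) (by simp)]
        simp [pvTagCont, pvBGo_cons]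
      · by_cases h2 : ch = '>'
        · subst h2
          have step : pvALoop ('>' :: rest) ('<' :: t) parts =
              pvALoop rest [] (parts ++ [String.ofList ('<' :: t ++ ['>'])]) := by
            simp [pvALoop]
          rw [step, (ih (parts ++ [String.ofList ('<' :: t ++ ['>'])])).1]
          simp [pvTagCont]
        · have step : pvALoop (ch :: rest) ('<' :: t) parts =
              pvALoop rest ('<' :: (t ++ [ch])) parts := by
            simp [pvALoop, h1, h2]
          rw [step, (ih parts).2.2 (t ++ [ch])
            (by intro hmem; rcases List.mem_append.mp hmem with h | h
                · exact hlt h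
                · simp at h; exact h1 h.symm)
            (by intro hmem; rcases List.mem_append.mp hmem with h | h
                · exact hgt h
                · simp at h; exact h2 h.symm)]
          simp [pvTagCont, h1, h2]

-- ===== VERDICT (by name: the statement is the Claim_ definition above) =====
theorem split_formatted_string_py_spec : Claim_equal_split_formatted_string_py := by
  intro s _
  unfold Spec_split_formatted_string_py split_formatted_string_py split_formatted_string_py_alt
  have := (pvKey s.toList []).1
  simpa [pvFin] using this
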